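-- pv_equiv track=rewrite | github.com/minhphan03/CodeSignal | Intro/Eruption of Light/isBeautifulString.py | solution
-- ===== SOURCE A (Python) =====
-- from collections import OrderedDict,  OrderedDict
--
-- def solution(inputString):
--     d = {}
--     for i in range(97, 123):
--         d[chr(i)] = 0
--     for c in inputString:
--         d[c] += 1
--     od = OrderedDict(sorted(d.items()))
--     if list(od.values()) != sorted(list(od.values()), reverse=True):
--         return False
--     return True
-- ===== SOURCE B (Python) =====
-- ALPHABET = 'abcdefghijklmnopqrstuvwxyz'
--
-- def solution(inputString):
--     s = sorted(inputString)
--     idx = 0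
--     prev = None
--     i = 0
--     while i < len(s):
--         j = i
--         while j < len(s) and s[j] == s[i]:
--             j += 1
--         if ALPHABET.index(s[i]) != idx:
--             return False
--         if prev is not None and j - i > prev:
--             return False
--         prev = j - i
--         idx += 1
--         i = j
--     return True
-- ===== Notes on version B (the rewrite author's own statement) =====
-- stated objective: alternative
-- what changed: Drops the 26-entry count dict, the OrderedDict and the sorted-descending value comparison entirely: B sorts the string itself and makes one run-length scan over the sorted string, checking that the runs are the consecutive letters from the start of the alphabet with non-increasing lengths (ranking each run's letter with ALPHABET.index, which like A rejects non-lowercase characters by raising).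
import Mathlib
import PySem

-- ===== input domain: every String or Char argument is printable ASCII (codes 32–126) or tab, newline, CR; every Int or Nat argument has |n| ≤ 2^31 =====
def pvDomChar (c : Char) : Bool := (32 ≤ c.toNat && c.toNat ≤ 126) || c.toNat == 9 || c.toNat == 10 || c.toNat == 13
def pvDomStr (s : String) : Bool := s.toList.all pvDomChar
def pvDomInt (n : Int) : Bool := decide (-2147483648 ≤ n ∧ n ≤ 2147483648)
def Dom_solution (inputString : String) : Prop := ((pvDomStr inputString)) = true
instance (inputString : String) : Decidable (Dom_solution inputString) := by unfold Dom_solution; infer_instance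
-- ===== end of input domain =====

-- B drops the 26-entry count dict, the OrderedDict and the sorted-descending value comparison:
-- it sorts the string itself and makes one run-length scan over the sorted string, checking the
-- runs are the consecutive letters from the start of the alphabet with non-increasing lengths
-- (alternative algorithm).

-- ===== PORT A =====
def solution (inputString : String) : Bool :=
  -- d = {}; for i in range(97, 123): d[chr(i)] = 0
  let d : PySem.Dict Char Int :=
    (PySem.List.pyRange 97 123 1).foldl
      (fun d i => d.insert (Char.ofNat i.toNat) 0) PySem.Dict.empty
  -- for c in inputString: d[c] += 1   (a missing key is a KeyError: excluded by Pre_solution,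
  -- on that branch the port leaves d unchanged)
  let d : PySem.Dict Char Int :=
    inputString.toList.foldl
      (fun d c =>
        match d.get? c with
        | some v => d.insert c (v + 1)
        | none => d)
      d
  -- od = OrderedDict(sorted(d.items())): the items' keys are distinct, so sorting the pairs
  -- lexicographically is sorting them by key
  let od : PySem.Dict Char Int :=
    PySem.Dict.ofList (PySem.List.sorted d.items (fun p => p.1) false)
  -- if list(od.values()) != sorted(list(od.values()), reverse=True): return False; return True
  if od.values ≠ PySem.List.sorted od.values (fun x => x) true then false
  else true

-- ===== PORT B =====
-- ALPHABET = 'abcdefghijklmnopqrstuvwxyz'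
def pvAlphabet : List Char := "abcdefghijklmnopqrstuvwxyz".toList

-- B's outer while loop over the sorted character list; the inner
-- 'while j < len(s) and s[j] == s[i]' run scan is the takeWhile/dropWhile split at the
-- same position j.  fuel is only a structural totality guard: each step drops a whole
-- nonempty run, so fuel = len(s) never runs out
def bLoop : Nat → List Char → Int → Option Int → Bool
  | _, [], _, _ => true
  | 0, _ :: _, _, _ => true
  | fuel + 1, c :: rest, idx, prev =>
    -- j - i, the run length of c
    let run : Int := 1 + ((rest.takeWhile (fun x => x == c)).length : Int)
    -- if ALPHABET.index(s[i]) != idx: return False   (for a one-character needle str.index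
    -- is the position in the character list, exact here; a char not in ALPHABET raises
    -- ValueError: excluded by Pre_solution, that dead branch returns false)
    match PySem.List.index? pvAlphabet c with
    | none => false
    | some j =>
      if (j : Int) ≠ idx then false
      -- if prev is not None and j - i > prev: return False
      else if (match prev with | some p => decide (p < run) | none => false) = true then false
      else bLoop fuel (rest.dropWhile (fun x => x == c)) (idx + 1) (some run)

def solution_alt (inputString : String) : Bool :=
  -- s = sorted(inputString)
  let s := PySem.List.sorted inputString.toList (fun x => x) false
  -- idx = 0; prev = None; i = 0; while i < len(s): …
  bLoop s.length s 0 none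

-- ===== PRECONDITION & SPEC =====
def pvLower (c : Char) : Bool := 97 ≤ c.toNat && c.toNat ≤ 122

-- Pre_ excludes exactly the strings containing a non-lowercase-letter character: there A raises KeyError.
def Pre_solution (inputString : String) : Prop := inputString.toList.all pvLower = true
instance (inputString : String) : Decidable (Pre_solution inputString) := by
  unfold Pre_solution; infer_instance

def pvWitness_solution : String := "aab"

def Spec_solution (inputString : String) (out : Bool) : Prop := out = solution_alt inputString
instance (inputString : String) (out : Bool) : Decidable (Spec_solution inputString out) := by
  unfold Spec_solution; infer_instance

-- ===== CLAIM (what is proved, stated in full; the proofs are below) =====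
def Claim_equal_solution : Prop := ∀ (inputString : String), Dom_solution inputString →
  Pre_solution inputString → Spec_solution inputString (solution inputString)

-- ===== LEMMAS AND PROOFS =====

-- the 26 lowercase letters, in the order A's seeding loop inserts them
def pvL : List Char := (PySem.List.pyRange 97 123 1).map (fun i => Char.ofNat i.toNat)

theorem pvL_eq : pvL = "abcdefghijklmnopqrstuvwxyz".toList := by decide

theorem mem_pvL {c : Char} (h : pvLower c = true) : c ∈ pvL := by
  simp only [pvLower, Bool.and_eq_true, decide_eq_true_eq] at h
  refine List.mem_map.mpr ⟨(c.toNat : Int), PySem.List.mem_pyRange_one.mpr ⟨by omega, by omega⟩, ?_⟩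
  simp [Char.ofNat_toNat]

-- A's counting loop: items stay "pvL tagged with running counts"
theorem loopA_items :
    ∀ (t : List Char) (g : Char → Int) (d : PySem.Dict Char Int),
      (∀ c ∈ t, pvLower c = true) →
      d.items = pvL.map (fun k => (k, g k)) →
      (t.foldl (fun d c =>
          match d.get? c with
          | some v => d.insert c (v + 1)
          | none => d) d).items
        = pvL.map (fun k => (k, g k + (t.count k : Int))) := by
  intro t
  induction t with
  | nil => intro g d _ hd; simpa using hd
  | cons c t ih =>
    intro g d hall hd
    have hcL : c ∈ pvL := mem_pvL (hall c (by simp))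
    have hkeys : d.keys = pvL := by
      simp [PySem.Dict.keys, hd, List.map_map, Function.comp_def]
    have hnodup : d.keys.Nodup := by rw [hkeys, pvL_eq]; decide
    have hmem : (c, g c) ∈ d.items := by
      rw [hd]; exact List.mem_map.mpr ⟨c, hcL, rfl⟩
    have hget : d.get? c = some (g c) := PySem.Dict.get?_of_mem_items d hmem hnodup
    have hcont : d.contains c = true := by
      rw [PySem.Dict.contains_iff_mem_keys, hkeys]; exact hcL
    have hstep : (d.insert c (g c + 1)).items
        = pvL.map (fun k => (k, if k = c then g k + 1 else g k)) := by
      rw [PySem.Dict.items_insert_of_contains d _ hcont, hd, List.map_map]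
      refine List.map_congr_left (fun k _ => ?_)
      by_cases hk : k = c
      · subst hk; simp
      · simp [hk]
    simp only [List.foldl_cons, hget]
    rw [ih (fun k => if k = c then g k + 1 else g k) _ (fun x hx => hall x (by simp [hx])) hstep]
    refine List.map_congr_left (fun k _ => ?_)
    by_cases hk : k = c
    · subst hk; simp; ring
    · simp [hk, Ne.symm hk]

-- A returns true iff its value list equals its own descending sort iff it is pairwise non-increasing
theorem eq_sorted_rev_iff (xs : List Int) :
    xs = PySem.List.sorted xs (fun x => x) true ↔ xs.Pairwise (fun a b => b ≤ a) := by
  constructor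
  · intro h
    have := PySem.List.sorted_pairwise_rev xs (fun x => x)
    rwa [← h] at this
  · intro h
    exact (PySem.List.sorted_rev_eq_self_of_pairwise xs (fun x => x) h).symm

-- ---- B-side: the sorted string is the concatenation of the letters' runs ----

-- pvCanonL ks f = the runs: for each letter k of ks in order, f k copies of k
def pvCanonL : List Char → (Char → Nat) → List Char
  | [], _ => []
  | k :: ks, f => List.replicate (f k) k ++ pvCanonL ks f

theorem mem_canonL {x : Char} : ∀ {ks : List Char} {f : Char → Nat},
    x ∈ pvCanonL ks f → x ∈ ks := by
  intro ks
  induction ks with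
  | nil => intro f h; simp [pvCanonL] at h
  | cons k ks ih =>
    intro f h
    rcases List.mem_append.mp h with h | h
    · simp [List.eq_of_mem_replicate h]
    · exact List.mem_cons_of_mem _ (ih h)

theorem canonL_eq_nil {ks : List Char} {f : Char → Nat} :
    pvCanonL ks f = [] ↔ ∀ k ∈ ks, f k = 0 := by
  induction ks with
  | nil => simp [pvCanonL]
  | cons k ks ih =>
    simp [pvCanonL, List.append_eq_nil_iff, ih, List.replicate_eq_nil_iff]

theorem count_canonL (x : Char) : ∀ (ks : List Char) (f : Char → Nat), ks.Nodup →
    (pvCanonL ks f).count x = if x ∈ ks then f x else 0 := by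
  intro ks
  induction ks with
  | nil => intro f _; simp [pvCanonL]
  | cons k ks ih =>
    intro f hnd
    rw [List.nodup_cons] at hnd
    simp only [pvCanonL, List.count_append, List.count_replicate, ih f hnd.2]
    by_cases hx : x = k
    · subst hx
      simp [hnd.1]
    · simp [hx, Ne.symm hx]

theorem canonL_pairwise : ∀ (ks : List Char) (f : Char → Nat),
    ks.Pairwise (fun a b => a ≤ b) →
    (pvCanonL ks f).Pairwise (fun a b : Char => a ≤ b) := by
  intro ks
  induction ks with
  | nil => intro f _; simp [pvCanonL]
  | cons k ks ih =>
    intro f hp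
    rw [List.pairwise_cons] at hp
    refine List.pairwise_append.mpr ⟨?_, ih f hp.2, ?_⟩
    · exact List.pairwise_replicate.mpr (Or.inr le_rfl)
    · intro a ha b hb
      rw [List.eq_of_mem_replicate ha]
      exact hp.1 b (mem_canonL hb)

-- the cap carried by B's loop: the first run length may not exceed prev
def pvCap : List Nat → Option Int → Prop
  | c :: _, some p => (c : Int) ≤ p
  | _, _ => True

-- splitting a run off the rest of the sorted list
theorem rep_split (k : Char) (t : List Char) (ht : ∀ x ∈ t, x ≠ k) :
    ∀ (m : Nat),
      (List.replicate m k ++ t).takeWhile (fun x => x == k) = List.replicate m k ∧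
      (List.replicate m k ++ t).dropWhile (fun x => x == k) = t := by
  intro m
  induction m with
  | zero =>
    cases t with
    | nil => simp
    | cons x t =>
      have h : (x == k) = false := by
        simpa using ht x (by simp)
      simp [h]
  | succ m ih =>
    simp [List.replicate_succ, ih]

-- from a non-increasing list whose first element is ≤ c, every element is ≤ c
theorem pairwise_head_le {l : List Nat} {c : Nat}
    (hp : l.Pairwise (fun a b => b ≤ a)) (hc : pvCap l (some (c : Int))) :
    ∀ x ∈ l, x ≤ c := by
  cases l with
  | nil => simp
  | cons h t =>
    rw [List.pairwise_cons] at hp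
    have h2 : ((h : Nat) : Int) ≤ ((c : Nat) : Int) := hc
    have hhc : h ≤ c := by exact_mod_cast h2
    intro x hx
    rcases List.mem_cons.mp hx with rfl | hx
    · exact hhc
    · exact le_trans (hp.1 x hx) hhc

-- non-increasing on a cons = non-increasing on the tail under the head as cap
theorem pairwise_cons_iff_cap (c : Nat) (l : List Nat) :
    (c :: l).Pairwise (fun a b => b ≤ a) ↔
      (l.Pairwise (fun a b => b ≤ a) ∧ pvCap l (some (c : Int))) := by
  rw [List.pairwise_cons]
  constructor
  · rintro ⟨h1, h2⟩
    refine ⟨h2, ?_⟩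
    cases l with
    | nil => trivial
    | cons x t =>
      show ((x : Nat) : Int) ≤ ((c : Nat) : Int)
      exact_mod_cast h1 x (by simp)
  · rintro ⟨h2, hcap⟩
    exact ⟨pairwise_head_le h2 hcap, h2⟩

-- B's loop on the canonical run list decides exactly "run lengths non-increasing (under the cap)"
theorem bLoop_canonL (f : Char → Nat) :
    ∀ (ks : List Char) (e : Nat) (prev : Option Int) (fuel : Nat),
      (∀ i (h : i < ks.length), PySem.List.index? pvAlphabet (ks[i]) = some (e + i)) →
      (∀ p, prev = some p → 0 ≤ p) →
      (pvCanonL ks f).length ≤ fuel →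
      (bLoop fuel (pvCanonL ks f) (e : Int) prev = true ↔
        ((ks.map f).Pairwise (fun a b => b ≤ a) ∧ pvCap (ks.map f) prev)) := by
  intro ks
  induction ks with
  | nil => intro e prev fuel _ _ _; simp [pvCanonL, bLoop, pvCap]
  | cons k ks ih =>
    intro e prev fuel hcode hprev hfuel
    have hk : PySem.List.index? pvAlphabet k = some e := by simpa using hcode 0 (by simp)
    have hcode' : ∀ i (h : i < ks.length),
        PySem.List.index? pvAlphabet (ks[i]) = some ((e + 1) + i) := by
      intro i h
      have h2 := hcode (i + 1) (by simpa using Nat.succ_lt_succ h)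
      simp only [List.getElem_cons_succ] at h2
      have h3 : e + (i + 1) = (e + 1) + i := by omega
      rw [h2, h3]
    have hne : ∀ x ∈ pvCanonL ks f, x ≠ k := by
      intro x hx hxk
      obtain ⟨i, hi, rfl⟩ := List.mem_iff_getElem.mp (mem_canonL hx)
      have h2 := hcode' i hi
      rw [hxk, hk] at h2
      simp at h2
      omega
    simp only [List.map_cons]
    by_cases hc : f k = 0
    · have hcanon : pvCanonL (k :: ks) f = pvCanonL ks f := by
        simp [pvCanonL, hc]
      rw [hcanon, hc]
      have hrhs : ((0 :: ks.map f).Pairwise (fun a b => b ≤ a) ∧ pvCap (0 :: ks.map f) prev)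
          ↔ ∀ x ∈ ks.map f, x = 0 := by
        constructor
        · rintro ⟨hp, _⟩ x hx
          rw [List.pairwise_cons] at hp
          exact Nat.le_zero.mp (hp.1 x hx)
        · intro hz
          refine ⟨?_, ?_⟩
          · rw [List.pairwise_cons]
            refine ⟨fun x hx => (hz x hx).le, ?_⟩
            refine List.pairwise_iff_forall_sublist.mpr ?_
            intro a b hab
            have hsub := hab.subset
            rw [hz a (hsub (by simp)), hz b (hsub (by simp))]
          · cases prev with
            | none => trivial
            | some p =>
              show ((0 : Nat) : Int) ≤ p
              simpa using hprev p rfl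
      rw [hrhs]
      cases hnil : pvCanonL ks f with
      | nil =>
        have hz := canonL_eq_nil.mp hnil
        refine iff_of_true (by cases fuel <;> simp [bLoop]) ?_
        intro x hx
        obtain ⟨y, hy, rfl⟩ := List.mem_map.mp hx
        exact hz y hy
      | cons x t =>
        have hxm : x ∈ pvCanonL ks f := by rw [hnil]; simp
        obtain ⟨i, hi, hx⟩ := List.mem_iff_getElem.mp (mem_canonL hxm)
        refine iff_of_false ?_ ?_
        · rw [hcanon, hnil] at hfuel
          cases fuel with
          | zero => simp at hfuel
          | succ fuel =>
            rw [bLoop.eq_def]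
            dsimp only
            have hxi : PySem.List.index? pvAlphabet x = some ((e + 1) + i) := by
              rw [← hx]; exact hcode' i hi
            rw [hxi]
            dsimp only
            rw [if_pos (by push_cast; omega)]
            simp
        · intro hz
          have : ∀ y ∈ ks, f y = 0 := by
            intro y hy
            exact hz (f y) (List.mem_map.mpr ⟨y, hy, rfl⟩)
          rw [canonL_eq_nil.mpr this] at hnil
          cases hnil
    · obtain ⟨m, hm⟩ : ∃ m, f k = m + 1 := ⟨f k - 1, by omega⟩
      have hsplit := rep_split k (pvCanonL ks f) hne m
      have hcanon : pvCanonL (k :: ks) f = k :: (List.replicate m k ++ pvCanonL ks f) := by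
        simp [pvCanonL, hm, List.replicate_succ]
      rw [hcanon] at hfuel ⊢
      simp only [List.length_cons, List.length_append, List.length_replicate] at hfuel
      cases fuel with
      | zero => omega
      | succ fuel =>
      rw [bLoop.eq_def]
      dsimp only
      rw [hk]
      dsimp only
      simp only [hsplit.1, hsplit.2, List.length_replicate]
      rw [if_neg (by simp)]
      have hrun : (1 : Int) + (m : Int) = ((f k : Nat) : Int) := by
        rw [hm]; push_cast; ring
      have hih := ih (e + 1) (some ((f k : Nat) : Int)) fuel hcode'
        (by intro p hp; cases hp; positivity) (by omega)
      have hcast : ((e : Nat) : Int) + 1 = (((e + 1 : Nat)) : Int) := by push_cast; ring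
      rw [pairwise_cons_iff_cap]
      cases prev with
      | none =>
        rw [if_neg (by simp)]
        rw [hrun, hcast, hih]
        simp [pvCap]
      | some p =>
        by_cases hpc : p < (1 : Int) + (m : Int)
        · rw [if_pos (by simpa using hpc)]
          refine iff_of_false (by simp) ?_
          rintro ⟨-, hcap⟩
          have : ((f k : Nat) : Int) ≤ p := hcap
          omega
        · rw [if_neg (by simpa using hpc)]
          rw [hrun, hcast, hih]
          have hcap : pvCap (f k :: ks.map f) (some p) := by
            show ((f k : Nat) : Int) ≤ p
            omega
          constructor
          · rintro ⟨h1, h2⟩; exact ⟨⟨h1, h2⟩, hcap⟩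
          · rintro ⟨⟨h1, h2⟩, -⟩; exact ⟨h1, h2⟩

-- ===== VERDICT (by name: the statement is the Claim_ definition above) =====
theorem solution_spec : Claim_equal_solution := by
  intro s _ hpre
  unfold Spec_solution solution solution_alt
  have hall : ∀ c ∈ s.toList, pvLower c = true := by
    simpa [Pre_solution, List.all_eq_true] using hpre
  -- the seeded dict
  have hd0 : ((PySem.List.pyRange 97 123 1).foldl
      (fun (d : PySem.Dict Char Int) i => d.insert (Char.ofNat i.toNat) 0)
      PySem.Dict.empty).items = pvL.map (fun k => (k, (0 : Int))) := by decide
  -- after the counting loop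
  have hd : (s.toList.foldl (fun d c =>
      match d.get? c with
      | some v => d.insert c (v + 1)
      | none => d)
      ((PySem.List.pyRange 97 123 1).foldl
        (fun (d : PySem.Dict Char Int) i => d.insert (Char.ofNat i.toNat) 0)
        PySem.Dict.empty)).items
      = pvL.map (fun k => (k, (s.toList.count k : Int))) := by
    rw [loopA_items s.toList (fun _ => (0 : Int)) _ hall hd0]
    exact List.map_congr_left (fun k _ => by simp)
  simp only []
  rw [hd]
  -- name the item and value lists
  set X : List (Char × Int) := pvL.map (fun k => (k, (s.toList.count k : Int))) with hX
  set V : List Int := pvL.map (fun k => (s.toList.count k : Int)) with hV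
  -- the items are already sorted by key
  have hsorted : PySem.List.sorted X (fun p => p.1) false = X := by
    refine PySem.List.sorted_eq_self_of_pairwise X (fun p => p.1) ?_
    rw [hX]
    refine List.pairwise_map.mpr ?_
    exact List.Pairwise.imp (fun h => h)
      (show pvL.Pairwise (fun a b : Char => a ≤ b) by rw [pvL_eq]; decide)
  -- OrderedDict over distinct fresh keys keeps the item list
  have hod : (PySem.Dict.ofList X).items = X := by
    have hnodup : (X.map (fun p => p.1)).Nodup := by
      rw [hX, List.map_map]
      simpa [Function.comp_def] using (by rw [pvL_eq]; decide : pvL.Nodup)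
    have := PySem.Dict.items_foldl_insert_fresh X (fun p => p.1) (fun p => p.2)
      PySem.Dict.empty (fun a _ => PySem.Dict.contains_empty _) hnodup
    simpa [PySem.Dict.ofList, PySem.Dict.update] using this
  have hvalues : (PySem.Dict.ofList X).values = V := by
    simp only [PySem.Dict.values]
    rw [hod, hX, hV, List.map_map]
    exact List.map_congr_left (fun k _ => rfl)
  rw [hsorted, hvalues]
  -- B's side: the sorted string is the canonical run list of the letter counts
  set f : Char → Nat := fun k => s.toList.count k with hf
  have hVcast : V = (pvL.map f).map (fun n : Nat => (n : Int)) := by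
    rw [hV, List.map_map]; rfl
  have hperm : (pvCanonL pvL f).Perm s.toList := by
    rw [List.perm_iff_count]
    intro x
    rw [count_canonL x pvL f (by rw [pvL_eq]; decide)]
    by_cases hx : x ∈ pvL
    · simp [hx, hf]
    · have h0 : s.toList.count x = 0 :=
        List.count_eq_zero.mpr (fun hm => hx (mem_pvL (hall x hm)))
      simp [hx, h0]
  have hpairC : (pvCanonL pvL f).Pairwise (fun a b : Char => a ≤ b) :=
    canonL_pairwise pvL f (by rw [pvL_eq]; decide)
  have hsortedS : PySem.List.sorted s.toList (fun x => x) false = pvCanonL pvL f :=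
    PySem.List.sorted_id_eq_of_perm_of_pairwise s.toList (pvCanonL pvL f) hperm hpairC
  rw [hsortedS]
  have hbl := bLoop_canonL f pvL 0 none (pvCanonL pvL f).length (by decide)
    (by intro p hp; simp at hp) (le_refl _)
  rw [show (((0 : Nat)) : Int) = (0 : Int) from rfl] at hbl
  -- the two non-increasing conditions are the same up to the Nat → Int cast
  have hiff : V.Pairwise (fun a b => b ≤ a) ↔ (pvL.map f).Pairwise (fun a b => b ≤ a) := by
    rw [hVcast, List.pairwise_map]
    constructor
    · exact fun h => h.imp (fun hab => by exact_mod_cast hab)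
    · exact fun h => h.imp (fun hab => by exact_mod_cast hab)
  have hcap : pvCap (pvL.map f) none := by cases (pvL.map f) <;> trivial
  by_cases hP : (pvL.map f).Pairwise (fun a b => b ≤ a)
  · rw [if_neg (by simpa using (eq_sorted_rev_iff V).mpr (hiff.mpr hP))]
    exact (hbl.mpr ⟨hP, hcap⟩).symm
  · rw [if_pos (by simpa using fun hc => hP (hiff.mp ((eq_sorted_rev_iff V).mp hc)))]
    have hnb : ¬ bLoop (pvCanonL pvL f).length (pvCanonL pvL f) 0 none = true :=
      fun h => hP (hbl.mp h).1
    cases hb2 : bLoop (pvCanonL pvL f).length (pvCanonL pvL f) 0 none with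
    | false => rfl
    | true => exact absurd hb2 hnb
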